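-- pv_equiv track=rewrite | github.com/benchmarko/BMbench | bmbench.py | bench00
-- ===== SOURCE A (Python) =====
-- def bench00(n):
--   x = 0
--   n_div_65536 = (n >> 16) & 0xffff
--   n_mod_65536 = n & 0xffff;
--
--   # simulate summation with 16 bit borders...
--   for i in range(n_div_65536, 0, -1):
--     for j in range(65535, 0, -1):
--       x += j
--   for j in range(n_mod_65536, 0, -1):
--     x += j
--
--   return int(x & 0xffff)
-- ===== SOURCE B (Python) =====
-- def bench00(n):
--   # closed-form triangular sums instead of the two counting loops
--   n_div_65536 = (n >> 16) & 0xffff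
--   n_mod_65536 = n & 0xffff
--   total = n_div_65536 * 2147450880 + n_mod_65536 * (n_mod_65536 + 1) // 2
--   return total & 0xffff
-- ===== Notes on version B (the rewrite author's own statement) =====
-- stated objective: faster
-- what changed: Replaces the nested counting loops by closed-form triangular-number formulas (65535*65536/2 per outer block plus m*(m+1)/2 for the remainder) and masks once.
import Mathlib
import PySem

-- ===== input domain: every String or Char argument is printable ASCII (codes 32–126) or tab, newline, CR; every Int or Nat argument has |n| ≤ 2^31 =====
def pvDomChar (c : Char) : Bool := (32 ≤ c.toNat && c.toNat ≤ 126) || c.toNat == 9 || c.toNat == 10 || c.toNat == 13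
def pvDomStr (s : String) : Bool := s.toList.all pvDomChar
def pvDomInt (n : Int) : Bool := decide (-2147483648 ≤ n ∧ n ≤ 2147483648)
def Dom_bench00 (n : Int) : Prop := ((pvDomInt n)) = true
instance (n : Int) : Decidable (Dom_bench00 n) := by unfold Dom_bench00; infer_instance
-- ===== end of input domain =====

-- B replaces A's O(n) counting loops by closed-form triangular sums (objective: faster, asymptotic).

-- ===== PORT A =====
def bench00 (n : Int) : Int :=
  let x : Int := 0
  let n_div_65536 := PySem.Int.band (n >>> 16) 0xffff
  let n_mod_65536 := PySem.Int.band n 0xffff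
  let x := (PySem.List.pyRange n_div_65536 0 (-1)).foldl
    (fun x _i => (PySem.List.pyRange 65535 0 (-1)).foldl (fun x j => x + j) x) x
  let x := (PySem.List.pyRange n_mod_65536 0 (-1)).foldl (fun x j => x + j) x
  PySem.Int.band x 0xffff

-- ===== PORT B =====
def bench00_alt (n : Int) : Int :=
  let n_div_65536 := PySem.Int.band (n >>> 16) 0xffff
  let n_mod_65536 := PySem.Int.band n 0xffff
  let total := n_div_65536 * 2147450880 +
    PySem.Int.floordiv (n_mod_65536 * (n_mod_65536 + 1)) 2
  PySem.Int.band total 0xffff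

-- ===== PRECONDITION & SPEC =====
def Spec_bench00 (n : Int) (out : Int) : Prop := out = bench00_alt n
instance (n : Int) (out : Int) : Decidable (Spec_bench00 n out) := by unfold Spec_bench00; infer_instance

-- ===== CLAIM (what is proved, stated in full; the proofs are below) =====
def Claim_equal_bench00 : Prop := ∀ (n : Int), Dom_bench00 n → Spec_bench00 n (bench00 n)

-- ===== LEMMAS AND PROOFS =====

-- summing k, k-1, ..., 1 onto an accumulator is the triangular number k*(k+1)/2
lemma pv_sum_cd (k : Nat) (x : Int) :
    (PySem.List.pyRange (k : Int) 0 (-1)).foldl (fun x j => x + j) x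
      = x + ((k * (k + 1) / 2 : Nat) : Int) := by
  induction k generalizing x with
  | zero => simp [PySem.List.pyRange_neg_one_eq_nil (by omega : (0:Int) ≤ 0)]
  | succ m ih =>
    rw [show PySem.List.pyRange ((m:Nat).succ : Int) 0 (-1)
          = ((m:Int)+1) :: PySem.List.pyRange ((m:Int)+1-1) 0 (-1) by
        rw [PySem.List.pyRange_neg_one_cons (by positivity)]; push_cast; ring_nf]
    have he : ((m:Int)+1-1) = (m:Int) := by ring
    simp only [List.foldl_cons, he, ih]
    obtain ⟨c, hc⟩ := Nat.even_mul_succ_self m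
    obtain ⟨c', hc'⟩ := Nat.even_mul_succ_self (m+1)
    have hrel : (m+1) * (m+1+1) = m * (m+1) + 2*(m+1) := by ring
    omega

-- the inner loop always adds the constant 2147450880 = 65535*65536/2
lemma pv_inner (y : Int) :
    (PySem.List.pyRange 65535 0 (-1)).foldl (fun x j => x + j) y = y + 2147450880 := by
  have h := pv_sum_cd 65535 y
  norm_num at h
  exact_mod_cast h

-- k iterations each adding the constant inner sum
lemma pv_const (k : Nat) (x : Int) :
    (PySem.List.pyRange (k : Int) 0 (-1)).foldl (fun x _i => x + 2147450880) x
      = x + (k : Int) * 2147450880 := by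
  induction k generalizing x with
  | zero => simp [PySem.List.pyRange_neg_one_eq_nil (by omega : (0:Int) ≤ 0)]
  | succ m ih =>
    rw [show PySem.List.pyRange ((m:Nat).succ : Int) 0 (-1)
          = ((m:Int)+1) :: PySem.List.pyRange ((m:Int)+1-1) 0 (-1) by
        rw [PySem.List.pyRange_neg_one_cons (by positivity)]; push_cast; ring_nf]
    have he : ((m:Int)+1-1) = (m:Int) := by ring
    simp only [List.foldl_cons, he, ih]
    push_cast; ring

-- ===== VERDICT (by name: the statement is the Claim_ definition above) =====
theorem bench00_spec : Claim_equal_bench00 := by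
  intro n _hd
  unfold Spec_bench00 bench00 bench00_alt
  have hdnn : 0 ≤ PySem.Int.band (n >>> 16) 0xffff := by
    rw [PySem.Int.band_comm]
    exact PySem.Int.band_nonneg_of_nonneg_left _ (by norm_num)
  have hmnn : 0 ≤ PySem.Int.band n 0xffff := by
    rw [PySem.Int.band_comm]
    exact PySem.Int.band_nonneg_of_nonneg_left _ (by norm_num)
  obtain ⟨d, hd⟩ := Int.eq_ofNat_of_zero_le hdnn
  obtain ⟨m, hm⟩ := Int.eq_ofNat_of_zero_le hmnn
  simp only [hd, hm, pv_inner]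
  rw [pv_const d 0, show ((m : Int)) = ((m : Nat) : Int) from rfl, pv_sum_cd]
  rw [PySem.Int.floordiv_eq_ediv_of_pos (by norm_num)]
  congr 1
  obtain ⟨c, hc⟩ := Nat.even_mul_succ_self m
  have hkey : ((m : Int) * ((m : Int) + 1)) / 2 = ((m * (m + 1) / 2 : Nat) : Int) := by
    have hA : ((m : Int) * ((m : Int) + 1)) = ((m * (m + 1) : Nat) : Int) := by
      push_cast; ring
    rw [hA]; omega
  rw [hkey]; ring
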